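-- pv_equiv track=rewrite | github.com/Plakhotniuk/ComputationalComplexity | hw3/src/partition_exhaustive.py | partition_exhaustive
-- ===== SOURCE A (Python) =====
-- from itertools import combinations
--
-- def partition_exhaustive(nums):
--     """
--     Determine if the array can be partitioned into two subsets with equal sums using exhaustive search.
--     :param nums: List[int] - The input list of integers.
--     :return: bool - True if the partition exists, False otherwise.
--     """
--     total_sum = sum(nums)
--
--     # If the total sum is odd, partitioning into two equal subsets is impossible
--     if total_sum % 2 != 0:
--         return False
--
--     target_sum = total_sum // 2
--
--     # Check all possible subsets
--     for r in range(1, len(nums) + 1):  # Subset sizes from 1 to len(nums)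
--         for subset in combinations(nums, r):
--             if sum(subset) == target_sum:
--                 return True
--
--     return False
-- ===== SOURCE B (Python) =====
-- def partition_exhaustive(nums):
--     """
--     Determine if the array can be partitioned into two subsets with equal sums,
--     using a reachable-sums dynamic programme over the sums of nonempty subsets.
--     """
--     total = sum(nums)
--     if total % 2 != 0:
--         return False
--     target = total // 2
--     reachable = set()  # sums of nonempty subsets of the prefix processed so far
--     for x in nums:
--         reachable = reachable | {s + x for s in reachable} | {x}
--         if target in reachable:
--             return True
--     return target in reachable
-- ===== Notes on version B (the rewrite author's own statement) =====
-- stated objective: alternative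
-- what changed: Replaced the exhaustive scan over all combinations of every size with a one-pass reachable-subset-sums dynamic programme over a set, with an early exit once the target sum becomes reachable.
import Mathlib
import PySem

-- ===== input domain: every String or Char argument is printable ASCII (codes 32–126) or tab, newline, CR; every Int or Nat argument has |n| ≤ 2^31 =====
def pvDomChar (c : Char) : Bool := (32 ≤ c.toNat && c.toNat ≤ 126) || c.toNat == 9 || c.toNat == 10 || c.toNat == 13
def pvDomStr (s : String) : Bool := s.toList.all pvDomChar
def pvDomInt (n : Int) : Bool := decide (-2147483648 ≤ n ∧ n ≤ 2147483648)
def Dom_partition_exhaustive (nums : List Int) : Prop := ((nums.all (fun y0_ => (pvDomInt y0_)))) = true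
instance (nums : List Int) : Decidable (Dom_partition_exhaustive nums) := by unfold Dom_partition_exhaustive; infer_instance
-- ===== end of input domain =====

-- B replaces A's exhaustive scan over all subset sizes (itertools.combinations) by a
-- reachable-subset-sums dynamic programme over a set; equivalence of return values is proved.

-- ===== PORT A =====
-- itertools.combinations(xs, r), in itertools' order (transliteration of its semantics)
def pvCombs : List Int → Nat → List (List Int)
  | _, 0 => [[]]
  | [], _ + 1 => []
  | x :: xs, r + 1 => (pvCombs xs r).map (fun c => x :: c) ++ pvCombs xs (r + 1)

def partition_exhaustive (nums : List Int) : Bool :=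
  let total := nums.sum
  if PySem.Int.mod total 2 ≠ 0 then false
  else
    let target := PySem.Int.floordiv total 2
    (PySem.List.pyRange 1 (nums.length + 1) 1).any fun r =>
      (pvCombs nums r.toNat).any fun subset => subset.sum == target

-- ===== PORT B =====
def pvStep (acc : PySem.Set Int) (x : Int) : PySem.Set Int :=
  PySem.Set.union (PySem.Set.union acc (PySem.Set.ofList (acc.map (fun s => s + x))))
    (PySem.Set.ofList [x])

-- the for-loop of Source B with its early return; falls through to Source B's final membership test
def pvLoopB (target : Int) : List Int → PySem.Set Int → Bool
  | [], reachable => PySem.Set.contains reachable target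
  | x :: xs, reachable =>
    let reachable' := pvStep reachable x
    if PySem.Set.contains reachable' target then true
    else pvLoopB target xs reachable'

def partition_exhaustive_alt (nums : List Int) : Bool :=
  let total := nums.sum
  if PySem.Int.mod total 2 ≠ 0 then false
  else
    let target := PySem.Int.floordiv total 2
    pvLoopB target nums PySem.Set.empty

-- ===== PRECONDITION & SPEC =====
def Spec_partition_exhaustive (nums : List Int) (out : Bool) : Prop := out = partition_exhaustive_alt nums
instance (nums : List Int) (out : Bool) : Decidable (Spec_partition_exhaustive nums out) := by unfold Spec_partition_exhaustive; infer_instance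

-- ===== CLAIM (what is proved, stated in full; the proofs are below) =====
def Claim_equal_partition_exhaustive : Prop := ∀ (nums : List Int), Dom_partition_exhaustive nums → Spec_partition_exhaustive nums (partition_exhaustive nums)

-- ===== LEMMAS AND PROOFS =====

-- the members of pvCombs xs r are exactly the sublists of xs of length r
lemma mem_pvCombs (r : Nat) (xs c : List Int) :
    c ∈ pvCombs xs r ↔ c.Sublist xs ∧ c.length = r := by
  induction xs generalizing r c with
  | nil =>
    cases r with
    | zero => simp [pvCombs, List.sublist_nil]
    | succ r =>
      constructor
      · intro h; simp [pvCombs] at h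
      · rintro ⟨hs, hl⟩; rw [List.sublist_nil] at hs; subst hs; simp at hl
  | cons x xs ih =>
    cases r with
    | zero =>
      simp only [pvCombs, List.mem_singleton]
      constructor
      · rintro rfl; exact ⟨List.nil_sublist _, rfl⟩
      · rintro ⟨_, h⟩; exact List.eq_nil_of_length_eq_zero h
    | succ r =>
      simp only [pvCombs, List.mem_append, List.mem_map, ih]
      constructor
      · rintro (⟨c', ⟨hs, hl⟩, rfl⟩ | ⟨hs, hl⟩)
        · exact ⟨hs.cons_cons x, by simp [hl]⟩
        · exact ⟨hs.cons x, hl⟩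
      · rintro ⟨hs, hl⟩
        rcases List.sublist_cons_iff.mp hs with h | ⟨c', rfl, hc'⟩
        · exact Or.inr ⟨h, hl⟩
        · exact Or.inl ⟨c', ⟨hc', by simpa using hl⟩, rfl⟩

-- membership after one DP step
lemma mem_pvStep (acc : PySem.Set Int) (x y : Int) :
    y ∈ pvStep acc x ↔ y ∈ acc ∨ (∃ b ∈ acc, b + x = y) ∨ y = x := by
  simp [pvStep, PySem.Set.mem_union, PySem.Set.mem_ofList, or_assoc]

-- loop invariant: the set holds exactly the sums of nonempty sublists of the processed prefix
lemma reach_inv (xs : List Int) : ∀ (p : List Int) (acc : PySem.Set Int),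
    (∀ y, y ∈ acc ↔ ∃ s : List Int, s.Sublist p ∧ s ≠ [] ∧ s.sum = y) →
    ∀ y, y ∈ xs.foldl pvStep acc ↔
      ∃ s : List Int, s.Sublist (p ++ xs) ∧ s ≠ [] ∧ s.sum = y := by
  induction xs with
  | nil => intro p acc h y; simpa using h y
  | cons x xs ih =>
    intro p acc h y
    have step : ∀ y, y ∈ pvStep acc x ↔
        ∃ s : List Int, s.Sublist (p ++ [x]) ∧ s ≠ [] ∧ s.sum = y := by
      intro y
      rw [mem_pvStep]
      constructor
      · rintro (hy | ⟨b, hb, rfl⟩ | hyx)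
        · obtain ⟨s, hs, hne, hsum⟩ := (h y).mp hy
          exact ⟨s, hs.trans (List.sublist_append_left _ _), hne, hsum⟩
        · obtain ⟨s, hs, hne, hsum⟩ := (h b).mp hb
          exact ⟨s ++ [x], List.Sublist.append hs (List.Sublist.refl _), by simp,
            by simp [hsum]⟩
        · exact ⟨[x], List.sublist_append_right p [x], by simp, by simp [hyx]⟩
      · rintro ⟨s, hs, hne, rfl⟩
        rcases List.sublist_append_iff.mp hs with ⟨l₁, l₂, rfl, h₁, h₂⟩
        rcases List.sublist_singleton.mp h₂ with rfl | rfl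
        · left; exact (h _).mpr ⟨l₁, h₁, by simpa using hne, by simp⟩
        · by_cases hl : l₁ = []
          · subst hl; right; right; simp
          · right; left
            exact ⟨l₁.sum, (h _).mpr ⟨l₁, h₁, hl, rfl⟩, by simp⟩
    have := ih (p ++ [x]) (pvStep acc x) step y
    simpa [List.append_assoc] using this

-- membership in the folded set is monotone along the loop
lemma mem_foldl_pvStep_of_mem (xs : List Int) (acc : PySem.Set Int) (t : Int)
    (h : t ∈ acc) : t ∈ xs.foldl pvStep acc := by
  induction xs generalizing acc with
  | nil => exact h
  | cons x xs ih => exact ih _ ((mem_pvStep acc x t).mpr (Or.inl h))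

-- the early-exiting loop returns true iff the fully folded set would contain the target
lemma pvLoopB_iff (t : Int) (xs : List Int) : ∀ acc : PySem.Set Int,
    pvLoopB t xs acc = true ↔ t ∈ xs.foldl pvStep acc ∨ t ∈ acc := by
  induction xs with
  | nil => intro acc; simp [pvLoopB]
  | cons x xs ih =>
    intro acc
    by_cases hc : t ∈ pvStep acc x
    · have hl : pvLoopB t (x :: xs) acc = true := by simp [pvLoopB, hc]
      rw [hl]
      simp only [List.foldl_cons, true_iff]
      exact Or.inl (mem_foldl_pvStep_of_mem xs _ t hc)
    · have hacc : t ∉ acc := fun h => hc ((mem_pvStep acc x t).mpr (Or.inl h))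
      have hl : pvLoopB t (x :: xs) acc = pvLoopB t xs (pvStep acc x) := by
        simp [pvLoopB, hc]
      rw [hl, ih, List.foldl_cons]
      simp [hc, hacc]

-- A's nested any-scan finds a subset summing to t iff a nonempty sublist sums to t
lemma a_scan_iff (nums : List Int) (t : Int) :
    ((PySem.List.pyRange 1 (nums.length + 1) 1).any fun r =>
        (pvCombs nums r.toNat).any fun subset => subset.sum == t) = true ↔
      ∃ s : List Int, s.Sublist nums ∧ s ≠ [] ∧ s.sum = t := by
  rw [List.any_eq_true]
  constructor
  · rintro ⟨r, hr, hany⟩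
    rw [List.any_eq_true] at hany
    obtain ⟨c, hc, hsum⟩ := hany
    obtain ⟨hs, hl⟩ := (mem_pvCombs _ _ _).mp hc
    have hr' := (PySem.List.mem_pyRange_one).mp hr
    refine ⟨c, hs, ?_, by simpa using hsum⟩
    intro hnil
    subst hnil
    simp at hl
    omega
  · rintro ⟨s, hs, hne, rfl⟩
    refine ⟨(s.length : Int), ?_, ?_⟩
    · rw [PySem.List.mem_pyRange_one]
      have h1 : 1 ≤ s.length := by
        cases s with
        | nil => exact absurd rfl hne
        | cons _ _ => simp
      have h2 := hs.length_le
      omega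
    · rw [List.any_eq_true]
      exact ⟨s, (mem_pvCombs _ _ _).mpr ⟨hs, by simp⟩, by simp⟩

-- ===== VERDICT (by name: the statement is the Claim_ definition above) =====
theorem partition_exhaustive_spec : Claim_equal_partition_exhaustive := by
  intro nums _
  unfold Spec_partition_exhaustive partition_exhaustive partition_exhaustive_alt
  simp
  congr 1
  rw [Bool.eq_iff_iff, a_scan_iff, pvLoopB_iff]
  simp only [List.not_mem_nil, or_false]
  exact (reach_inv nums [] [] (by intro y; simp) _).symm
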